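-- pv_equiv track=rewrite | github.com/DMedina559/minecraft | scripts/moneyz.py | get_items_for_page
-- ===== SOURCE A (Python) =====
-- from typing import Dict, List, Any, Optional, Tuple
--
-- MAX_DYNAMIC_BUTTONS_FIRST_PAGE = 3
--
-- MAX_DYNAMIC_BUTTONS_MIDDLE_PAGE = 2
--
-- MAX_DYNAMIC_BUTTONS_LAST_PAGE = 3
--
-- MAX_DYNAMIC_BUTTONS_SINGLE_PAGE_LIST = 4
--
-- def get_items_for_page(all_items: List[Dict], page_num: int, total_pages: int) -> Tuple[List[Dict], int]:
--     """Gets the subset of items for the current page based on dynamic button limits."""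
--     if not all_items: return [], 0
--
--     items_on_this_page = []
--     current_item_idx = 0
--
--     if page_num == 1:
--         count = MAX_DYNAMIC_BUTTONS_SINGLE_PAGE_LIST if total_pages == 1 else MAX_DYNAMIC_BUTTONS_FIRST_PAGE
--         items_on_this_page = all_items[:count]
--         current_item_idx = len(items_on_this_page)
--     else: # page_num > 1
--         # Items on first page
--         current_item_idx = MAX_DYNAMIC_BUTTONS_FIRST_PAGE
--         # Items on middle pages before this one
--         for i in range(2, page_num): # Iterate through pages 2 up to current_page - 1
--             current_item_idx += MAX_DYNAMIC_BUTTONS_MIDDLE_PAGE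
--
--         if page_num == total_pages: # Last page
--             count = MAX_DYNAMIC_BUTTONS_LAST_PAGE
--         else: # Middle page
--             count = MAX_DYNAMIC_BUTTONS_MIDDLE_PAGE
--
--         items_on_this_page = all_items[current_item_idx : current_item_idx + count]
--         current_item_idx += len(items_on_this_page)
--
--     return items_on_this_page, current_item_idx
-- ===== SOURCE B (Python) =====
-- def get_items_for_page(all_items, page_num, total_pages):
--     """Page slice by a table of (start, capacity) pairs and drop-then-take slicing."""
--     if not all_items:
--         return [], 0
--     if page_num == 1:
--         start, cap = 0, (4 if total_pages == 1 else 3)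
--     else:
--         start = 3 + 2 * max(page_num - 2, 0)
--         cap = 3 if page_num == total_pages else 2
--     page = all_items[start:][:cap]
--     return page, start + len(page)
-- ===== Notes on version B (the rewrite author's own statement) =====
-- stated objective: simpler
-- what changed: replaces the per-page accumulation loop with a closed-form (start, capacity) computation and a drop-then-take two-stage slice, unifying all pages into one return path
import Mathlib
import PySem

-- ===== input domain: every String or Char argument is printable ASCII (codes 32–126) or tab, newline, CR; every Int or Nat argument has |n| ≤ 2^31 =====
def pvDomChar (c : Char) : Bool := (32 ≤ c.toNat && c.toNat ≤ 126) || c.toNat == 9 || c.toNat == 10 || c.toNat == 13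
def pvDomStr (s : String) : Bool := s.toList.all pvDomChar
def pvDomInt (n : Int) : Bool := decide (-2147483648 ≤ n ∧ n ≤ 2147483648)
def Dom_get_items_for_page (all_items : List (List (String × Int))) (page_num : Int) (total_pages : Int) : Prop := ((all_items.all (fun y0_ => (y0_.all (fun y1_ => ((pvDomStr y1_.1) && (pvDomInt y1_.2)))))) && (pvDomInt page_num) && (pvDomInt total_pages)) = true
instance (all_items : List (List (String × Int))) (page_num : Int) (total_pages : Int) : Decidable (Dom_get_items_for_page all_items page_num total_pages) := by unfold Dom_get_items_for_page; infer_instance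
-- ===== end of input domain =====

-- B replaces A's per-page accumulation loop by a closed-form (start, capacity) pair and a
-- drop-then-take two-stage slice with a single return path; same return value everywhere.

-- ===== PORT A =====
-- constants from the module
def MAX_DYNAMIC_BUTTONS_FIRST_PAGE : Int := 3
def MAX_DYNAMIC_BUTTONS_MIDDLE_PAGE : Int := 2
def MAX_DYNAMIC_BUTTONS_LAST_PAGE : Int := 3
def MAX_DYNAMIC_BUTTONS_SINGLE_PAGE_LIST : Int := 4

def get_items_for_page (all_items : List (List (String × Int))) (page_num : Int) (total_pages : Int) : (List (List (String × Int))) × Int :=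
  if all_items = [] then ([], 0)
  else if page_num = 1 then
    let count := if total_pages = 1 then MAX_DYNAMIC_BUTTONS_SINGLE_PAGE_LIST else MAX_DYNAMIC_BUTTONS_FIRST_PAGE
    let items_on_this_page := PySem.List.slice all_items none (some count)
    (items_on_this_page, (items_on_this_page.length : Int))
  else
    -- current_item_idx starts at 3, the for-loop adds 2 per middle page before this one
    let current_item_idx :=
      (PySem.List.pyRange 2 page_num 1).foldl (fun acc _ => acc + MAX_DYNAMIC_BUTTONS_MIDDLE_PAGE) MAX_DYNAMIC_BUTTONS_FIRST_PAGE
    let count := if page_num = total_pages then MAX_DYNAMIC_BUTTONS_LAST_PAGE else MAX_DYNAMIC_BUTTONS_MIDDLE_PAGE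
    let items_on_this_page := PySem.List.slice all_items (some current_item_idx) (some (current_item_idx + count))
    (items_on_this_page, current_item_idx + (items_on_this_page.length : Int))

-- ===== PORT B =====
-- (start, capacity) table, then page = all_items[start:][:cap]
def get_items_for_page_alt (all_items : List (List (String × Int))) (page_num : Int) (total_pages : Int) : (List (List (String × Int))) × Int :=
  if all_items = [] then ([], 0)
  else
    let sc : Int × Int :=
      if page_num = 1 then (0, if total_pages = 1 then 4 else 3)
      else (3 + 2 * max (page_num - 2) 0, if page_num = total_pages then 3 else 2)
    let page := PySem.List.slice (PySem.List.slice all_items (some sc.1) none) none (some sc.2)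
    (page, sc.1 + (page.length : Int))

-- ===== PRECONDITION & SPEC =====
def Spec_get_items_for_page (all_items : List (List (String × Int))) (page_num : Int) (total_pages : Int) (out : (List (List (String × Int))) × Int) : Prop := out = get_items_for_page_alt all_items page_num total_pages
instance (all_items : List (List (String × Int))) (page_num : Int) (total_pages : Int) (out : (List (List (String × Int))) × Int) : Decidable (Spec_get_items_for_page all_items page_num total_pages out) := by unfold Spec_get_items_for_page; infer_instance

-- ===== CLAIM =====
def Claim_equal_get_items_for_page : Prop := ∀ (all_items : List (List (String × Int))) (page_num : Int) (total_pages : Int), Dom_get_items_for_page all_items page_num total_pages → Spec_get_items_for_page all_items page_num total_pages (get_items_for_page all_items page_num total_pages)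

-- ===== LEMMAS AND PROOFS =====
-- a fold adding a constant is init + c * length
theorem foldl_const_add (l : List Int) (init c : Int) :
    l.foldl (fun acc _ => acc + c) init = init + c * l.length := by
  induction l generalizing init with
  | nil => simp
  | cons x xs ih => simp only [List.foldl_cons, ih, List.length_cons]; push_cast; ring

theorem get_items_for_page_spec : Claim_equal_get_items_for_page := by
  intro all_items page_num total_pages _
  unfold Spec_get_items_for_page get_items_for_page get_items_for_page_alt
  by_cases h0 : all_items = []
  · simp [h0]
  · by_cases h1 : page_num = 1
    · -- page 1: xs[:c] = xs[0:][:c]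
      by_cases h2 : total_pages = 1 <;>
        simp [h0, h1, h2, MAX_DYNAMIC_BUTTONS_SINGLE_PAGE_LIST, MAX_DYNAMIC_BUTTONS_FIRST_PAGE,
          PySem.List.slice_from (a := (0:Int)) (by omega),
          PySem.List.slice_to (b := (4:Int)) (by omega),
          PySem.List.slice_to (b := (3:Int)) (by omega)]
    · -- later pages: fold = 3 + 2*(page_num-2).toNat and both slices reduce to take/drop
      simp only [h0, h1, if_false, foldl_const_add, PySem.List.length_pyRange_one]
      set s : Int := MAX_DYNAMIC_BUTTONS_FIRST_PAGE + MAX_DYNAMIC_BUTTONS_MIDDLE_PAGE * ((page_num - 2).toNat : Int) with hs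
      have hseq : s = 3 + 2 * max (page_num - 2) 0 := by
        simp only [hs, MAX_DYNAMIC_BUTTONS_FIRST_PAGE, MAX_DYNAMIC_BUTTONS_MIDDLE_PAGE]; omega
      have hs0 : (0:Int) ≤ s := by omega
      have hB : ∀ c : Int, 0 ≤ c →
          PySem.List.slice (PySem.List.slice all_items (some (3 + 2 * max (page_num - 2) 0)) none) none (some c)
            = (all_items.drop s.toNat).take c.toNat := by
        intro c hc
        rw [PySem.List.slice_from _ (by omega), PySem.List.slice_to _ hc]
        congr 2
        omega
      have hA : ∀ c : Int, 0 ≤ c →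
          PySem.List.slice all_items (some s) (some (s + c)) = (all_items.drop s.toNat).take c.toNat := by
        intro c hc
        rw [PySem.List.slice_toNat _ hs0 (by omega)]
        congr 1
        omega
      by_cases h2 : page_num = total_pages
      · simp only [if_pos h2, MAX_DYNAMIC_BUTTONS_LAST_PAGE]
        rw [hA 3 (by decide), hB 3 (by decide), Prod.mk.injEq]
        exact ⟨rfl, by omega⟩
      · simp only [if_neg h2, MAX_DYNAMIC_BUTTONS_MIDDLE_PAGE]
        rw [hA 2 (by decide), hB 2 (by decide), Prod.mk.injEq]
        exact ⟨rfl, by omega⟩
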